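-- pv_equiv track=rewrite | github.com/Luca-ADB/XRFPM | XRFPM_phantoms_experimental.py | parallelogram
-- ===== SOURCE A (Python) =====
-- def parallelogram(height, width, shift, val, bkg):
--     rows = height
--     cols = width + shift*(height-1)
--     arr = [[bkg for _ in range(cols)] for _ in range(rows)]
--
--     for r in range(rows):
--         offset = shift * (height-r-1)
--         for c in range(width):
--             arr[r][offset+c] = val
--
--     return arr
-- ===== SOURCE B (Python) =====
-- def parallelogram(height, width, shift, val, bkg):
--     # Incremental construction: build only the bottom row explicitly, then derive
--     # each row above it from the previous one by prepending shift background cells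
--     # and trimming the same amount off the right; collect bottom-up, reverse once.
--     cols = width + shift*(height-1)
--     out = []
--     if height > 0:
--         row = [val]*width + [bkg]*(cols-width)
--         out.append(row)
--         for _ in range(height-1):
--             row = [bkg]*shift + row[:cols-shift]
--             out.append(row)
--     out.reverse()
--     return out
-- ===== Notes on version B (the rewrite author's own statement) =====
-- stated objective: alternative
-- what changed: B computes only the bottom row explicitly and derives every other row incrementally from the previous one (prepend shift background cells, slice the same amount off the right), collecting rows bottom-up and reversing once, instead of preallocating a full background grid and overwriting the val band of every row independently.
-- outside the precondition, e.g. on parallelogram(2, -3, 1, 7, 0): A returns [[], []], B returns [[0], [0]]; on parallelogram(3, 2, -1, 7, 0): A raises IndexError, B returns [[7], [7], [7, 7]]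
import Mathlib
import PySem

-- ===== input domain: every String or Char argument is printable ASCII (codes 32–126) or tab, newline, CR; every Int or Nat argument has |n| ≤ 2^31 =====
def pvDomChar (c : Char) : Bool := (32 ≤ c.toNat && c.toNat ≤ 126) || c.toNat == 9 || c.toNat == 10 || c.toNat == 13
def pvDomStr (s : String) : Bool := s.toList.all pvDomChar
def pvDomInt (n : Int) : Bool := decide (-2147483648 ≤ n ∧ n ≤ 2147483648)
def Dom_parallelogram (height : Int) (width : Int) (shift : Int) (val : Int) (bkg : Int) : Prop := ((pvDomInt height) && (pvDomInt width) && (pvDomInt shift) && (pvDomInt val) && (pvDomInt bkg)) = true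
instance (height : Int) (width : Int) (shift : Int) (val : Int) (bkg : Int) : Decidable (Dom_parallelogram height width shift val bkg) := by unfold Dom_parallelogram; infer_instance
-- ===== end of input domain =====

-- B derives each row incrementally from the previous one (prepend shift bkg cells, trim the
-- right) starting from the bottom row, collected bottom-up and reversed once, instead of
-- preallocating a background grid and mutating the val band of every row; equivalence proved on
-- Pre_ (width ≥ 0 and, on grids with height ≥ 2 and width ≥ 1, shift ≥ 0).


-- ===== PORT A =====
-- Python 'row[i] = v' with a possibly negative index (exact where the index is in range;
-- out of range Python raises IndexError, excluded by Pre_ below, here the list is returned unchanged)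
def pySetIdx (xs : List Int) (i : Int) (v : Int) : List Int :=
  let j := if i < 0 then i + xs.length else i
  if 0 ≤ j ∧ j < (xs.length : Int) then xs.set j.toNat v else xs

-- Python 'arr[r][i] = v' on a list of rows (same remark on out-of-range indices)
def pySetRow (arr : List (List Int)) (r : Int) (i : Int) (v : Int) : List (List Int) :=
  let j := if r < 0 then r + arr.length else r
  if 0 ≤ j ∧ j < (arr.length : Int) then
    arr.set j.toNat (pySetIdx (arr.getD j.toNat []) i v)
  else arr

def parallelogram (height : Int) (width : Int) (shift : Int) (val : Int) (bkg : Int) : List (List Int) :=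
  let rows := height
  let cols := width + shift * (height - 1)
  let arr := (PySem.List.pyRange 0 rows 1).map
      (fun _ => (PySem.List.pyRange 0 cols 1).map (fun _ => bkg))
  (PySem.List.pyRange 0 rows 1).foldl
    (fun arr r =>
      let offset := shift * (height - r - 1)
      (PySem.List.pyRange 0 width 1).foldl (fun arr c => pySetRow arr r (offset + c) val) arr)
    arr

-- ===== PORT B =====
def parallelogram_alt (height : Int) (width : Int) (shift : Int) (val : Int) (bkg : Int) : List (List Int) :=
  let cols := width + shift * (height - 1)
  let out : List (List Int) :=
    if 0 < height then
      let row0 := List.replicate width.toNat val ++ List.replicate (cols - width).toNat bkg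
      ((PySem.List.pyRange 0 (height - 1) 1).foldl
        (fun st _ =>
          let row := List.replicate shift.toNat bkg ++
            PySem.List.slice st.2 none (some (cols - shift))
          (st.1 ++ [row], row))
        ([row0], row0)).1
    else []
  out.reverse

-- ===== PRECONDITION & SPEC =====
-- Pre_ restricts to the natural domain of a nonnegative width (for negative width A silently
-- returns a full-background grid, a negative count being outside the intended use) and excludes
-- negative shift on non-degenerate grids (height ≥ 2 and width ≥ 1), where A raises IndexError.
def Pre_parallelogram (height : Int) (width : Int) (shift : Int) (val : Int) (bkg : Int) : Prop :=
  0 ≤ width ∧ (0 ≤ shift ∨ height ≤ 1 ∨ width = 0)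
instance (height : Int) (width : Int) (shift : Int) (val : Int) (bkg : Int) : Decidable (Pre_parallelogram height width shift val bkg) := by unfold Pre_parallelogram; infer_instance

def pvWitness_parallelogram : Int × Int × Int × Int × Int := (3, 2, 1, 7, 0)

def Spec_parallelogram (height : Int) (width : Int) (shift : Int) (val : Int) (bkg : Int) (out : List (List Int)) : Prop := out = parallelogram_alt height width shift val bkg
instance (height : Int) (width : Int) (shift : Int) (val : Int) (bkg : Int) (out : List (List Int)) : Decidable (Spec_parallelogram height width shift val bkg out) := by unfold Spec_parallelogram; infer_instance

-- ===== CLAIM (what is proved, stated in full; the proofs are below) =====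
def Claim_equal_parallelogram : Prop := ∀ (height : Int) (width : Int) (shift : Int) (val : Int) (bkg : Int), Dom_parallelogram height width shift val bkg → Pre_parallelogram height width shift val bkg → Spec_parallelogram height width shift val bkg (parallelogram height width shift val bkg)

-- ===== LEMMAS AND PROOFS =====

-- proof-side common form: row r of the grid is bkg^(s(h-r-1)) ++ val^w ++ bkg^(s r)
def specGrid (h w s val bkg : Int) : List (List Int) :=
  (PySem.List.pyRange 0 h 1).map
    (fun r =>
      List.replicate (s * (h - r - 1)).toNat bkg ++
      List.replicate w.toNat val ++
      List.replicate (s * r).toNat bkg)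

theorem pySetIdx_pos (xs : List Int) (i v : Int) (h0 : 0 ≤ i) (h1 : i < (xs.length : Int)) :
    pySetIdx xs i v = xs.set i.toNat v := by
  unfold pySetIdx
  rw [if_neg (show ¬ i < 0 by omega)]
  rw [if_pos ⟨h0, h1⟩]

theorem pySetRow_pos (a : List (List Int)) (r i v : Int) (h0 : 0 ≤ r) (h1 : r < (a.length : Int)) :
    pySetRow a r i v = a.set r.toNat (pySetIdx (a.getD r.toNat []) i v) := by
  unfold pySetRow
  rw [if_neg (show ¬ r < 0 by omega)]
  rw [if_pos ⟨h0, h1⟩]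

-- the inner loop over the whole grid only rewrites row r
theorem whole_to_row (val : Int) (F : Int → Int) (cs : List Int) (a : List (List Int)) (r : Int)
    (h0 : 0 ≤ r) (h1 : r < (a.length : Int)) :
    cs.foldl (fun a c => pySetRow a r (F c) val) a
      = a.set r.toNat (cs.foldl (fun row c => pySetIdx row (F c) val) (a.getD r.toNat [])) := by
  induction cs generalizing a with
  | nil =>
      simp only [List.foldl_nil]
      have hlt : r.toNat < a.length := by omega
      rw [List.getD_eq_getElem a [] hlt, List.set_getElem_self]
  | cons c cs ih =>
      simp only [List.foldl_cons]
      have hlt : r.toNat < a.length := by omega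
      rw [pySetRow_pos a r (F c) val h0 h1]
      rw [ih _ (by simpa using h1)]
      have hget : (a.set r.toNat (pySetIdx (a.getD r.toNat []) (F c) val)).getD r.toNat []
          = pySetIdx (a.getD r.toNat []) (F c) val := by
        rw [List.getD_eq_getElem _ [] (by simpa using hlt), List.getElem_set_self]
      rw [hget, List.set_set]

-- folding row-updates over distinct in-range indices = pointwise update
theorem outer_fold (f : List Int → Int → List Int)
    (step : List (List Int) → Int → List (List Int))
    (hstep : ∀ a r, 0 ≤ r → r < (a.length : Int) →
        step a r = a.set r.toNat (f (a.getD r.toNat []) r))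
    (cs : List Int) (arr : List (List Int))
    (hmem : ∀ r ∈ cs, 0 ≤ r ∧ r < (arr.length : Int)) (hnd : cs.Nodup) :
    cs.foldl step arr
      = arr.mapIdx (fun j row => if ((j : Int) ∈ cs) then f row (j : Int) else row) := by
  induction cs generalizing arr with
  | nil =>
      simp only [List.foldl_nil, List.not_mem_nil, if_false]
      apply List.ext_getElem (by simp)
      intro j hj hj'
      simp
  | cons r cs ih =>
      obtain ⟨h0, h1⟩ := hmem r (List.mem_cons_self ..)
      simp only [List.foldl_cons]
      rw [hstep arr r h0 h1]
      rw [ih _ (by intro x hx; simpa using hmem x (List.mem_cons_of_mem _ hx)) hnd.of_cons]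
      apply List.ext_getElem (by simp)
      intro j hj hj'
      have hlen : r.toNat < arr.length := by omega
      rw [List.getElem_mapIdx, List.getElem_mapIdx]
      have hjlt : j < arr.length := by simpa using hj'
      by_cases hjr : (j : Int) = r
      · have hjn : j = r.toNat := by omega
        have hnotin : ¬ ((j : Int) ∈ cs) := by
          rw [hjr]; exact (List.nodup_cons.mp hnd).1
        rw [if_neg hnotin, if_pos (by rw [hjr]; exact List.mem_cons_self ..)]
        subst hjn
        rw [List.getElem_set_self, List.getD_eq_getElem arr [] hlen, hjr]
      · have hjn : j ≠ r.toNat := by omega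
        rw [List.getElem_set_ne (by omega)]
        simp only [List.mem_cons, hjr, false_or]

-- the inner loop on one row paints a contiguous band of val
theorem inner_fold (val : Int) (n : Nat) (off : Int) (row : List Int)
    (hoff : 0 ≤ off) (hlen : off.toNat + n ≤ row.length) :
    (PySem.List.pyRange 0 (n : Int) 1).foldl (fun row c => pySetIdx row (off + c) val) row
      = row.take off.toNat ++ List.replicate n val ++ row.drop (off.toNat + n) := by
  induction n with
  | zero =>
      rw [PySem.List.pyRange_one_eq_nil (by norm_num)]
      simp
  | succ n ih =>
      have hcast : ((n + 1 : Nat) : Int) = (n : Int) + 1 := by push_cast; ring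
      rw [hcast, PySem.List.pyRange_one_succ_right (by positivity)]
      rw [List.foldl_append]
      rw [ih (by omega)]
      simp only [List.foldl_cons, List.foldl_nil]
      have hlen' : (row.take off.toNat ++ List.replicate n val ++ row.drop (off.toNat + n)).length
          = row.length := by
        simp only [List.length_append, List.length_take, List.length_replicate, List.length_drop]
        omega
      rw [pySetIdx_pos _ _ _ (by positivity) (by rw [hlen']; omega)]
      have htn : (off + (n : Int)).toNat = off.toNat + n := by omega
      rw [htn]
      have hta : (row.take off.toNat).length = off.toNat := by
        simp only [List.length_take]; omega
      rw [List.append_assoc, List.set_append_right _ _ (by omega)]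
      rw [hta]
      have : off.toNat + n - off.toNat = n := by omega
      rw [this]
      rw [List.set_append_right _ _ (by simp)]
      simp only [List.length_replicate, Nat.sub_self]
      have hdrop : row.drop (off.toNat + n) = row[off.toNat + n] :: row.drop (off.toNat + n + 1) := by
        exact List.drop_eq_getElem_cons (by omega)
      rw [hdrop]
      simp only [List.set_cons_zero]
      have hsucc : off.toNat + (n + 1) = off.toNat + n + 1 := rfl
      rw [hsucc]
      simp [List.replicate_succ', List.append_assoc]

-- A equals the common per-row band form
theorem A_eq_spec (h w s val bkg : Int) (hw : 0 ≤ w)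
    (hpre2 : 0 ≤ s ∨ h ≤ 1 ∨ w = 0) :
    parallelogram h w s val bkg = specGrid h w s val bkg := by
  simp only [parallelogram, specGrid]
  by_cases hh : h ≤ 0
  · have hnil : PySem.List.pyRange 0 h 1 = [] := PySem.List.pyRange_one_eq_nil (by omega)
    simp [hnil]
  · rw [not_le] at hh
    by_cases hw0 : w = 0
    · subst hw0
      have hnilw : PySem.List.pyRange 0 0 1 = [] := PySem.List.pyRange_one_eq_nil le_rfl
      simp only [hnilw, List.foldl_nil]
      rw [List.foldl_fixed' (fun a => rfl)]
      apply List.ext_getElem (by simp)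
      intro j hj hj'
      have hjh : (j : Int) < h := by
        simp only [List.length_map, PySem.List.length_pyRange_one] at hj'
        omega
      rw [List.getElem_map, List.getElem_map, PySem.List.getElem_pyRange_one]
      simp only [zero_add, Int.toNat_zero, List.replicate_zero,
        List.append_nil, List.map_const', PySem.List.length_pyRange_one]
      rw [← List.replicate_add]
      congr 1
      have h3 : s * (h - (j : Int) - 1) + s * (j : Int) = s * (h - 1) := by ring
      rcases (by omega : 0 ≤ s ∨ s < 0) with hs | hs
      · have h1 : 0 ≤ s * (h - (j : Int) - 1) := mul_nonneg hs (by omega)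
        have h2 : 0 ≤ s * (j : Int) := mul_nonneg hs (by omega)
        omega
      · have h1 : s * (h - (j : Int) - 1) ≤ 0 := mul_nonpos_of_nonpos_of_nonneg (by omega) (by omega)
        have h2 : s * (j : Int) ≤ 0 := mul_nonpos_of_nonpos_of_nonneg (by omega) (by omega)
        have h4 : s * (h - 1) ≤ 0 := mul_nonpos_of_nonpos_of_nonneg (by omega) (by omega)
        omega
    have hcase : 0 ≤ s ∨ h = 1 := by
      rcases hpre2 with hs | h1 | hw0' <;> [exact Or.inl hs; exact Or.inr (by omega); exact absurd hw0' hw0]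
    rw [outer_fold
        (f := fun row r => (PySem.List.pyRange 0 w 1).foldl
            (fun row c => pySetIdx row (s * (h - r - 1) + c) val) row)
        (hstep := by
          intro a r h0 h1
          exact whole_to_row val (fun c => s * (h - r - 1) + c) _ a r h0 h1)
        (hmem := by
          intro r hr
          rw [PySem.List.mem_pyRange_one] at hr
          simp only [List.length_map, PySem.List.length_pyRange_one]
          omega)
        (cs := PySem.List.pyRange 0 h 1)
        (hnd := PySem.List.nodup_pyRange_one 0 h)]
    apply List.ext_getElem (by simp)
    intro j hj hj'
    have hjh : (j : Int) < h := by
      simp only [List.length_map, PySem.List.length_pyRange_one] at hj'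
      omega
    rw [List.getElem_mapIdx, List.getElem_map, List.getElem_map,
        PySem.List.getElem_pyRange_one]
    simp only [zero_add]
    rw [if_pos (by rw [PySem.List.mem_pyRange_one]; omega)]
    have hR0 : (PySem.List.pyRange 0 (w + s * (h - 1)) 1).map (fun _ => bkg)
        = List.replicate (w + s * (h - 1)).toNat bkg := by
      rw [List.map_const']
      simp [PySem.List.length_pyRange_one]
    rw [hR0]
    have hwcast : w = ((w.toNat : Nat) : Int) := (Int.toNat_of_nonneg hw).symm
    have hsj : s * (h - (j : Int) - 1) + s * (j : Int) = s * (h - 1) := by ring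
    have hj0 : h = 1 → (j : Int) = 0 := by omega
    have hoff : 0 ≤ s * (h - (j : Int) - 1) := by
      rcases hcase with hs | h1
      · exact mul_nonneg hs (by omega)
      · rw [h1, hj0 h1]; simp
    have hoffle : s * (h - (j : Int) - 1) ≤ s * (h - 1) := by
      rcases hcase with hs | h1
      · exact mul_le_mul_of_nonneg_left (by omega) hs
      · rw [h1, hj0 h1]; norm_num
    have hsjnn : 0 ≤ s * (j : Int) := by
      rcases hcase with hs | h1
      · exact mul_nonneg hs (by omega)
      · rw [hj0 h1]; simp
    rw [show PySem.List.pyRange 0 w 1 = PySem.List.pyRange 0 ((w.toNat : Nat) : Int) 1 by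
      rw [← hwcast]]
    rw [inner_fold val w.toNat (s * (h - (j : Int) - 1)) _ hoff
        (by simp only [List.length_replicate]; omega)]
    rw [List.take_replicate, List.drop_replicate]
    rw [min_eq_left (by omega)]
    rw [show (w + s * (h - 1)).toNat - ((s * (h - ↑j - 1)).toNat + w.toNat)
        = (s * ↑j).toNat from by omega]

-- ---- B-side characterisation ----

-- B's row-derivation step, named for the proofs (definitionally the fold body of the port)
def bStep (s cols bkg : Int) (row : List Int) : List Int :=
  List.replicate s.toNat bkg ++ PySem.List.slice row none (some (cols - s))

-- the n rows produced by iterating a step function from a start row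
def iterRows (f : List Int → List Int) : Nat → List Int → List (List Int)
  | 0, _ => []
  | n + 1, r => r :: iterRows f n (f r)

-- row k counted from the BOTTOM of the grid
def bandRowUp (h w s val bkg k : Int) : List Int :=
  List.replicate (s * k).toNat bkg ++ List.replicate w.toNat val ++
    List.replicate (s * (h - 1 - k)).toNat bkg

-- B's fold collects exactly the iterates of its step
theorem foldl_iter (s cols bkg : Int) (l : List Int) (out : List (List Int)) (r : List Int) :
    (l.foldl
      (fun st (_ : Int) =>
        let row := List.replicate s.toNat bkg ++
          PySem.List.slice st.2 none (some (cols - s))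
        (st.1 ++ [row], row))
      (out, r)).1 = out ++ iterRows (bStep s cols bkg) l.length (bStep s cols bkg r) := by
  induction l generalizing out r with
  | nil => simp [iterRows]
  | cons x l ih =>
      simp only [List.foldl_cons, List.length_cons, iterRows]
      rw [show (l.foldl
          (fun st (_ : Int) =>
            let row := List.replicate s.toNat bkg ++
              PySem.List.slice st.2 none (some (cols - s))
            (st.1 ++ [row], row))
          (out ++ [List.replicate s.toNat bkg ++ PySem.List.slice r none (some (cols - s))],
           List.replicate s.toNat bkg ++ PySem.List.slice r none (some (cols - s)))).1
          = (out ++ [bStep s cols bkg r]) ++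
            iterRows (bStep s cols bkg) l.length (bStep s cols bkg (bStep s cols bkg r))
          from ih _ _]
      simp [bStep]

-- peeling one iterate off the front (definitional)
theorem iterRows_succ (f : List Int → List Int) (n : Nat) (r : List Int) :
    r :: iterRows f n (f r) = iterRows f (n + 1) r := rfl

-- one derivation step climbs one row of the parallelogram
theorem bStep_band (h w s val bkg k : Int) (hs : 0 ≤ s) (hw : 0 ≤ w)
    (hk : 0 ≤ k) (hk2 : k ≤ h - 2) :
    bStep s (w + s * (h - 1)) bkg (bandRowUp h w s val bkg k)
      = bandRowUp h w s val bkg (k + 1) := by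
  have hsk : 0 ≤ s * k := mul_nonneg hs hk
  have hsk1 : 0 ≤ s * (k + 1) := mul_nonneg hs (by omega)
  have htr : 0 ≤ s * (h - 1 - k) := mul_nonneg hs (by omega)
  have htr1 : 0 ≤ s * (h - 1 - (k + 1)) := mul_nonneg hs (by omega)
  have hto : 0 ≤ w + s * (h - 1) - s := by
    have : s * (h - 1) = s * k + w * 0 + s * (h - 1 - k - 1) + s := by ring
    nlinarith [mul_nonneg hs (show (0:Int) ≤ h - 1 - k - 1 by omega)]
  unfold bStep bandRowUp
  rw [PySem.List.slice_to _ hto]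
  have hsplit : s * (h - 1 - k) = s * (h - 1 - (k + 1)) + s := by ring
  have hlen : (w + s * (h - 1) - s).toNat
      = (s * k).toNat + (w.toNat + (s * (h - 1 - (k + 1))).toNat) := by
    have : w + s * (h - 1) = s * k + w + s * (h - 1 - k) := by ring
    omega
  rw [List.take_append]
  rw [List.take_of_length_le (by simp only [List.length_append, List.length_replicate]; omega)]
  rw [List.take_replicate]
  simp only [List.length_append, List.length_replicate]
  rw [min_eq_left (by omega)]
  rw [show (w + s * (h - 1) - s).toNat - ((s * k).toNat + w.toNat)
      = (s * (h - 1 - (k + 1))).toNat from by omega]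
  rw [← List.append_assoc, ← List.append_assoc, ← List.replicate_add]
  rw [show s.toNat + (s * k).toNat = (s * (k + 1)).toNat from by
    have : s * (k + 1) = s + s * k := by ring
    omega]

-- iterating the step from row k yields rows k, k+1, …, k+m-1 (bottom-up)
theorem iter_band (h w s val bkg : Int) (hs : 0 ≤ s) (hw : 0 ≤ w) :
    ∀ (m k : Nat), (k : Int) + m ≤ h →
    iterRows (bStep s (w + s * (h - 1)) bkg) m (bandRowUp h w s val bkg k)
      = (List.range m).map (fun i : Nat => bandRowUp h w s val bkg ((k : Int) + (i : Int))) := by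
  intro m
  induction m with
  | zero => intro k _; simp [iterRows]
  | succ n ih =>
      intro k hk
      simp only [iterRows]
      rcases Nat.eq_zero_or_pos n with hn | hn
      · subst hn
        simp [iterRows]
      · rw [bStep_band h w s val bkg k hs hw (by positivity) (by push_cast at hk ⊢; omega)]
        rw [show ((k : Int) + 1) = ((k + 1 : Nat) : Int) by push_cast; ring]
        rw [ih (k + 1) (by push_cast at hk ⊢; omega)]
        rw [List.range_succ_eq_map, List.map_cons, List.map_map]
        refine congrArg₂ List.cons ?_ ?_
        · congr 1
        · refine List.map_congr_left (fun i _ => ?_)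
          simp only [Function.comp_apply]
          congr 1
          push_cast
          ring

-- helper: iterating a fixpoint
theorem iterRows_fixed (f : List Int → List Int) (r : List Int) (hf : f r = r) :
    ∀ n, iterRows f n r = List.replicate n r := by
  intro n
  induction n with
  | zero => simp [iterRows]
  | succ n ih => simp [iterRows, hf, ih, List.replicate_succ]

-- B equals the common per-row band form
theorem B_eq_spec (h w s val bkg : Int) (hw : 0 ≤ w)
    (hpre2 : 0 ≤ s ∨ h ≤ 1 ∨ w = 0) :
    parallelogram_alt h w s val bkg = specGrid h w s val bkg := by
  simp only [parallelogram_alt, specGrid]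
  by_cases hh : h ≤ 0
  · have hnil : PySem.List.pyRange 0 h 1 = [] := PySem.List.pyRange_one_eq_nil (by omega)
    rw [if_neg (by omega)]
    simp [hnil]
  · rw [not_le] at hh
    rw [if_pos hh]
    rw [foldl_iter]
    rw [List.singleton_append, iterRows_succ]
    simp only [PySem.List.length_pyRange_one]
    rw [show (h - 1 - 0).toNat + 1 = (h - 0).toNat from by omega]
    rcases (by omega : 0 ≤ s ∨ s < 0) with hs | hsneg
    · -- main case: 0 ≤ s
      have hrow0 : List.replicate w.toNat val ++ List.replicate (w + s * (h - 1) - w).toNat bkg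
          = bandRowUp h w s val bkg ((0 : Nat) : Int) := by
        unfold bandRowUp
        simp only [Nat.cast_zero, mul_zero, Int.toNat_zero, List.replicate_zero, List.nil_append]
        congr 2
        ring_nf
      rw [hrow0]
      rw [iter_band h w s val bkg hs hw ((h - 0).toNat) 0 (by simp; omega)]
      apply List.ext_getElem (by simp [PySem.List.length_pyRange_one])
      intro j hj hj'
      have hjh : (j : Int) < h := by
        simp only [List.length_map, PySem.List.length_pyRange_one] at hj'
        omega
      have hjlt : j < (h - 0).toNat := by omega
      rw [List.getElem_reverse, List.getElem_map, List.getElem_map, List.getElem_range,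
          PySem.List.getElem_pyRange_one]
      simp only [Nat.cast_zero, zero_add, List.length_map, List.length_range]
      rw [show ((((h - 0).toNat - 1 - j : Nat)) : Int) = h - (j : Int) - 1
          from by omega]
      unfold bandRowUp
      congr 3
      congr 2
      omega
    · -- s < 0: Pre forces h = 1 or w = 0 here
      rcases hpre2 with hs' | h1 | hw0
      · omega
      · -- h = 1
        have h1' : h = 1 := by omega
        subst h1'
        rw [show ((1 : Int) - 0).toNat = 1 from by decide]
        rw [show PySem.List.pyRange 0 1 1 = [0] from by decide]
        simp [iterRows]
      · -- w = 0, h ≥ 1, s < 0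
        subst hw0
        have hrow0 : List.replicate (0 : Int).toNat val
            ++ List.replicate ((0 : Int) + s * (h - 1) - 0).toNat bkg = ([] : List Int) := by
          have hcols : s * (h - 1) ≤ 0 := mul_nonpos_of_nonpos_of_nonneg (le_of_lt hsneg)
            (show (0:Int) ≤ h - 1 by omega)
          simp [Int.toNat_of_nonpos hcols]
        rw [hrow0]
        have hfix : bStep s (0 + s * (h - 1)) bkg [] = [] := by
          unfold bStep
          rw [Int.toNat_of_nonpos (le_of_lt hsneg)]
          simp only [List.replicate_zero, List.nil_append]
          simp [PySem.List.slice]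
        rw [iterRows_fixed _ _ hfix]
        rw [List.reverse_replicate]
        apply List.ext_getElem (by simp)
        intro j hj hj'
        have hjh : (j : Int) < h := by
          simp only [List.length_map, PySem.List.length_pyRange_one] at hj'
          omega
        rw [List.getElem_replicate, List.getElem_map, PySem.List.getElem_pyRange_one]
        simp only [zero_add]
        have t1 : (s * (h - (j : Int) - 1)).toNat = 0 :=
          Int.toNat_of_nonpos (mul_nonpos_of_nonpos_of_nonneg (le_of_lt hsneg) (by omega))
        have t2 : (s * (j : Int)).toNat = 0 :=
          Int.toNat_of_nonpos (mul_nonpos_of_nonpos_of_nonneg (le_of_lt hsneg) (by omega))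
        simp [t1, t2]

-- ===== VERDICT (by name: the statement is the Claim_ definition above) =====
theorem parallelogram_spec : Claim_equal_parallelogram := by
  intro h w s val bkg _ hpre
  obtain ⟨hw, hpre2⟩ := hpre
  simp only [Spec_parallelogram]
  rw [A_eq_spec h w s val bkg hw hpre2, B_eq_spec h w s val bkg hw hpre2]
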